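-- pv_equiv track=rewrite | github.com/bnattes/riskblitz | blitz.py | battle
-- ===== SOURCE A (Python) =====
-- def battle(attack_roll, defend_roll, attack_num, defend_num):
--
--     for i in range(len(defend_roll)):
--         if (len(attack_roll) > 0) and (len(attack_roll) > 0):
--             if attack_roll.pop() > defend_roll.pop():
--                 defend_num -= 1
--             else:
--                 attack_num -= 1
--
--     return (attack_num, defend_num)
-- ===== SOURCE B (Python) =====
-- def battle(attack_roll, defend_roll, attack_num, defend_num):
--     # Same mutation as the original: the compared tails are removed from both lists.
--     k = min(len(attack_roll), len(defend_roll))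
--     wins = sum(1 for a, d in zip(attack_roll[len(attack_roll) - k:],
--                                  defend_roll[len(defend_roll) - k:]) if a > d)
--     del attack_roll[len(attack_roll) - k:]
--     del defend_roll[len(defend_roll) - k:]
--     return (attack_num - (k - wins), defend_num - wins)
-- ===== Notes on version B (the rewrite author's own statement) =====
-- stated objective: simpler
-- what changed: Replaces the mutating pop-pop loop driven by range(len(defend_roll)) with a closed-form bulk computation: k = min of the lengths, one zip over the aligned tails counting attacker wins, then two arithmetic updates and a single bulk delete of each compared tail.
import Mathlib
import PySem

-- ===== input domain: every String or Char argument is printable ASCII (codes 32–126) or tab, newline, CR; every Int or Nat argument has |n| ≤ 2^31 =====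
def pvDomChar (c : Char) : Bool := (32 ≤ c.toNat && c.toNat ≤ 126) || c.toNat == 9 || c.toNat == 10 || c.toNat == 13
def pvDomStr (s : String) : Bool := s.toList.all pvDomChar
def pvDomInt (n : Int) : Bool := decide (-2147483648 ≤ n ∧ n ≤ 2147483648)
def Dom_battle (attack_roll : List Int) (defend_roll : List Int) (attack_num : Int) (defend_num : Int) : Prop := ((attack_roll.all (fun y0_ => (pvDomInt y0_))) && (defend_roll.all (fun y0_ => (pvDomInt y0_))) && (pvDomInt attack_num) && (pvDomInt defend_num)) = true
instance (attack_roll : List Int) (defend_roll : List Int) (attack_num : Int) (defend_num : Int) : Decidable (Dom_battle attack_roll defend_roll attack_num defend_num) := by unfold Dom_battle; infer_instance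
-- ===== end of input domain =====

-- B replaces A's mutating pop-pop loop by a closed-form tail count (objective: simpler).
-- Both Pythons mutate the argument lists identically (both compared tails are deleted);
-- the equivalence proved here is about the RETURN value.

-- ===== PORT A =====
-- one iteration of A's `for i in range(len(defend_roll))` body; the `| _, _` arm only
-- makes the match total (in A's executions the guarded pops never fail)
def battleStep (s : List Int × List Int × Int × Int) : List Int × List Int × Int × Int :=
  match s with
  | (att, deff, an, dn) =>
    if att.length > 0 then
      match PySem.List.pop? att, PySem.List.pop? deff with
      | some (a, att'), some (d, deff') =>
          if a > d then (att', deff', an, dn - 1) else (att', deff', an - 1, dn)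
      | _, _ => (att, deff, an, dn)
    else (att, deff, an, dn)

def battle (attack_roll : List Int) (defend_roll : List Int) (attack_num : Int) (defend_num : Int) : Int × Int :=
  -- range(len(defend_roll)) is evaluated once, before the loop mutates the lists
  let r := (List.range defend_roll.length).foldl (fun s _ => battleStep s)
             (attack_roll, defend_roll, attack_num, defend_num)
  (r.2.2.1, r.2.2.2)

-- ===== PORT B =====
def battle_alt (attack_roll : List Int) (defend_roll : List Int) (attack_num : Int) (defend_num : Int) : Int × Int :=
  let k := min attack_roll.length defend_roll.length
  -- attack_roll[len-k:] / defend_roll[len-k:] with a nonnegative start index = List.drop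
  let wins := ((attack_roll.drop (attack_roll.length - k)).zip
                 (defend_roll.drop (defend_roll.length - k))).countP (fun p => decide (p.1 > p.2))
  (attack_num - ((k : Int) - (wins : Int)), defend_num - (wins : Int))

-- ===== PRECONDITION & SPEC =====
def Spec_battle (attack_roll : List Int) (defend_roll : List Int) (attack_num : Int) (defend_num : Int) (out : Int × Int) : Prop := out = battle_alt attack_roll defend_roll attack_num defend_num
instance (attack_roll : List Int) (defend_roll : List Int) (attack_num : Int) (defend_num : Int) (out : Int × Int) : Decidable (Spec_battle attack_roll defend_roll attack_num defend_num out) := by unfold Spec_battle; infer_instance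

-- ===== CLAIM (what is proved, stated in full; the proofs are below) =====
def Claim_equal_battle : Prop := ∀ (attack_roll : List Int) (defend_roll : List Int) (attack_num : Int) (defend_num : Int), Dom_battle attack_roll defend_roll attack_num defend_num → Spec_battle attack_roll defend_roll attack_num defend_num (battle attack_roll defend_roll attack_num defend_num)

-- ===== LEMMAS AND PROOFS =====

theorem foldl_range_iterate {σ : Type} (f : σ → σ) (n : Nat) (s : σ) :
    (List.range n).foldl (fun s _ => f s) s = f^[n] s := by
  induction n generalizing s with
  | zero => simp
  | succ m ih =>
      rw [List.range_succ, List.foldl_append, Function.iterate_succ_apply']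
      simp only [List.foldl_cons, List.foldl_nil]
      rw [ih]

theorem zip_take_eq {α β : Type} (n : Nat) (xs : List α) (ys : List β) :
    (xs.take n).zip (ys.take n) = (xs.zip ys).take n := by
  induction n generalizing xs ys with
  | zero => simp
  | succ m ih =>
      cases xs with
      | nil => simp
      | cons x xs' =>
          cases ys with
          | nil => simp
          | cons y ys' => simp [ih]

theorem zip_reverse_eq {α β : Type} (xs : List α) (ys : List β) (h : xs.length = ys.length) :
    xs.reverse.zip ys.reverse = (xs.zip ys).reverse := by
  induction xs generalizing ys with
  | nil => cases ys with | nil => simp | cons y ys' => simp at h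
  | cons x xs' ih =>
      cases ys with
      | nil => simp at h
      | cons y ys' =>
          simp only [List.length_cons, Nat.succ_inj] at h
          simp only [List.reverse_cons, List.zip_cons_cons]
          rw [List.zip_append (by simp [h]), ih ys' h]
          simp

theorem battle_loop_char (n : Nat) (ra rd : List Int) (an dn : Int) :
    battleStep^[n] (ra.reverse, rd.reverse, an, dn) =
      ((ra.drop (min n (min ra.length rd.length))).reverse,
       (rd.drop (min n (min ra.length rd.length))).reverse,
       an - ((min n (min ra.length rd.length) : Int)
              - (((ra.zip rd).take n).countP (fun p => decide (p.1 > p.2)) : Int)),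
       dn - (((ra.zip rd).take n).countP (fun p => decide (p.1 > p.2)) : Int)) := by
  induction n generalizing ra rd an dn with
  | zero => simp
  | succ m ih =>
      rw [Function.iterate_succ_apply]
      cases ra with
      | nil =>
          have hstep : battleStep (([] : List Int).reverse, rd.reverse, an, dn)
              = (([] : List Int).reverse, rd.reverse, an, dn) := by
            simp [battleStep]
          rw [hstep, ih]
          simp
          all_goals omega
      | cons a ra' =>
          cases rd with
          | nil =>
              have hstep : battleStep ((a :: ra').reverse, ([] : List Int).reverse, an, dn)
                  = ((a :: ra').reverse, ([] : List Int).reverse, an, dn) := by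
                simp only [List.reverse_cons, List.reverse_nil, battleStep]
                rw [PySem.List.pop?_last]
                simp [PySem.List.pop?]
              rw [hstep, ih]
              simp
              all_goals omega
          | cons d rd' =>
              have hk : min (m + 1) (min (ra'.length + 1) (rd'.length + 1))
                  = min m (min ra'.length rd'.length) + 1 := by omega
              have hstep : battleStep ((a :: ra').reverse, (d :: rd').reverse, an, dn)
                  = if a > d then (ra'.reverse, rd'.reverse, an, dn - 1)
                    else (ra'.reverse, rd'.reverse, an - 1, dn) := by
                simp only [List.reverse_cons, battleStep]
                rw [PySem.List.pop?_last, PySem.List.pop?_last]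
                simp
              rw [hstep]
              by_cases hcmp : a > d
              · simp only [if_pos hcmp]
                rw [ih]
                simp only [List.length_cons, hk, List.drop_succ_cons, List.zip_cons_cons,
                  List.take_succ_cons, List.countP_cons, hcmp, decide_true]
                refine Prod.ext rfl (Prod.ext rfl (Prod.ext ?_ ?_)) <;> push_cast <;> omega
              · simp only [if_neg hcmp]
                rw [ih]
                simp only [List.length_cons, hk, List.drop_succ_cons, List.zip_cons_cons,
                  List.take_succ_cons, List.countP_cons, hcmp, decide_false]
                refine Prod.ext rfl (Prod.ext rfl (Prod.ext ?_ ?_)) <;> push_cast <;> omega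

-- the tail-zip of B equals the reversed zip of the reversed lists
theorem tail_zip_eq (xs ys : List Int) :
    (xs.drop (xs.length - min xs.length ys.length)).zip
        (ys.drop (ys.length - min xs.length ys.length))
      = (xs.reverse.zip ys.reverse).reverse := by
  have hx : xs.drop (xs.length - min xs.length ys.length)
      = (xs.reverse.take (min xs.length ys.length)).reverse := by
    rw [List.take_reverse, List.reverse_reverse]
  have hy : ys.drop (ys.length - min xs.length ys.length)
      = (ys.reverse.take (min xs.length ys.length)).reverse := by
    rw [List.take_reverse, List.reverse_reverse]
  rw [hx, hy, zip_reverse_eq _ _ (by simp [List.length_take]),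
      zip_take_eq, List.take_of_length_le (by simp)]

-- ===== VERDICT (by name: the statement is the Claim_ definition above) =====
theorem battle_spec : Claim_equal_battle := by
  intro att deff an dn _
  show battle att deff an dn = battle_alt att deff an dn
  unfold battle battle_alt
  have h := battle_loop_char deff.length att.reverse deff.reverse an dn
  simp only [List.reverse_reverse, List.length_reverse] at h
  rw [foldl_range_iterate, h]
  have htake : ((att.reverse.zip deff.reverse).take deff.length)
      = att.reverse.zip deff.reverse :=
    List.take_of_length_le (by simp only [List.length_zip, List.length_reverse]; omega)
  have hcnt : ((att.reverse.zip deff.reverse).countP (fun p => decide (p.1 > p.2)))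
      = ((att.drop (att.length - min att.length deff.length)).zip
          (deff.drop (deff.length - min att.length deff.length))).countP
            (fun p => decide (p.1 > p.2)) := by
    rw [tail_zip_eq, List.countP_reverse]
  simp only [htake, hcnt]
  exact Prod.ext (by push_cast; omega) rfl
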